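-- pv_equiv track=rewrite | github.com/carlos-decelera/app-database-bot | main.py | dividir_mensaje
-- ===== SOURCE A (Python) =====
-- def dividir_mensaje(texto: str, max_chars: int = 3000) -> list[str]:
--     if len(texto) <= max_chars:
--         return [texto]
--     partes, resto = [], texto
--     while len(resto) > max_chars:
--         corte = resto.rfind("\n", 0, max_chars)
--         if corte < 0:
--             corte = max_chars
--         partes.append(resto[:corte].strip())
--         resto = resto[corte:].strip()
--     if resto:
--         partes.append(resto)
--     return partes
-- ===== SOURCE B (Python) =====
-- def dividir_mensaje(texto: str, max_chars: int = 3000) -> list[str]: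
--     if len(texto) <= max_chars:
--         return [texto]
--     partes = []
--     s = texto
--     i, end = 0, len(s)
--     while end - i > max_chars:
--         corte = s.rfind("\n", i, i + max_chars)
--         rel = corte - i if corte >= 0 else max_chars
--         partes.append(s[i:i + rel].strip())
--         i += rel
--         while i < end and s[i].isspace():
--             i += 1
--         while end > i and s[end - 1].isspace():
--             end -= 1
--     if i < end:
--         partes.append(s[i:end])
--     return partes
-- ===== Notes on version B (the rewrite author's own statement) =====
-- stated objective: faster
-- what changed: B scans the original string with index pointers (start/end) and whitespace-skipping loops instead of re-slicing and re-stripping the whole remaining string on every iteration, so only each emitted chunk is copied.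
-- outside the precondition, e.g. on dividir_mensaje(' ', 0): A returns [''], B returns ['']; on dividir_mensaje('\n', 0): A returns [''], B returns ['']
import Mathlib
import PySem

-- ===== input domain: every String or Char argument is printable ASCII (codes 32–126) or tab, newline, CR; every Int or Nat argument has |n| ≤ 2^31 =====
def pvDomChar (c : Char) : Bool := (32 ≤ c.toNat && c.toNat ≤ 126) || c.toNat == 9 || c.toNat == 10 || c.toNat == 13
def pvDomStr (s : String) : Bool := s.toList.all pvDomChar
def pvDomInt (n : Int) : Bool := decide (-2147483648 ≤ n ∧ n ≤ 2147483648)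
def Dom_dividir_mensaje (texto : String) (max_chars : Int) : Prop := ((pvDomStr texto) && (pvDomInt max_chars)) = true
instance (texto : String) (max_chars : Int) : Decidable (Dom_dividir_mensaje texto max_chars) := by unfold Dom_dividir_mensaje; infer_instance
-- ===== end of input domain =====

-- B replaces A's repeated slice-and-strip of the remaining string by index pointers into the
-- original string, copying only each emitted chunk (objective: faster).


-- ===== PORT A =====
-- A's while loop, fuel-based; fuel = len(texto) + 1 is enough under Pre_ (the remainder
-- shrinks by at least one character per iteration when 1 ≤ max_chars).
def dmLoopA (m : Int) : Nat → List (List Char) → List Char → List (List Char)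
  | 0, partes, _ => partes
  | fuel + 1, partes, resto =>
    if (resto.length : Int) > m then
      let corte0 := PySem.Chars.rfindFrom resto ['\n'] 0 (some m)
      let corte := if corte0 < 0 then m else corte0
      dmLoopA m fuel
        (partes ++ [PySem.Chars.strip (PySem.List.slice resto none (some corte))])
        (PySem.Chars.strip (PySem.List.slice resto (some corte) none))
    else
      if resto ≠ [] then partes ++ [resto] else partes

def dividir_mensaje (texto : String) (max_chars : Int) : List String :=
  if PySem.Str.len texto ≤ max_chars then [texto]
  else (dmLoopA max_chars (texto.toList.length + 1) [] texto.toList).map String.ofList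

-- ===== PORT B =====
-- 'while i < end and s[i].isspace(): i += 1'
def dmSkipWs (s : List Char) (i e : Int) : Int :=
  if i < e ∧ PySem.Chars.isspace (PySem.List.pyGetD s i ' ') then dmSkipWs s (i + 1) e else i
  termination_by (e - i).toNat
  decreasing_by omega

-- 'while end > i and s[end - 1].isspace(): end -= 1'
def dmTrimEnd (s : List Char) (i e : Int) : Int :=
  if e > i ∧ PySem.Chars.isspace (PySem.List.pyGetD s (e - 1) ' ') then dmTrimEnd s i (e - 1) else e
  termination_by (e - i).toNat
  decreasing_by omega

-- B's while loop, same fuel discipline as A's port.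
def dmLoopB (s : List Char) (m : Int) : Nat → List (List Char) → Int → Int → List (List Char)
  | 0, partes, _, _ => partes
  | fuel + 1, partes, i, e =>
    if e - i > m then
      let corte := PySem.Chars.rfindFrom s ['\n'] i (some (i + m))
      let rel := if corte ≥ 0 then corte - i else m
      let i1 := i + rel
      let i' := dmSkipWs s i1 e
      let e' := dmTrimEnd s i' e
      dmLoopB s m fuel
        (partes ++ [PySem.Chars.strip (PySem.List.slice s (some i) (some i1))]) i' e'
    else
      if i < e then partes ++ [PySem.List.slice s (some i) (some e)] else partes

def dividir_mensaje_alt (texto : String) (max_chars : Int) : List String :=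
  if PySem.Str.len texto ≤ max_chars then [texto]
  else
    (dmLoopB texto.toList max_chars (texto.toList.length + 1) [] 0 (texto.toList.length : Int)).map
      String.ofList

-- ===== PRECONDITION & SPEC =====
-- Pre_ excludes max_chars ≤ 0: there A's loop fails to shrink the remainder and A diverges on
-- every text longer than max_chars whose remainder is not stripped to empty; A returns only in
-- trivial short/all-whitespace cases there (where B happens to agree anyway).
def Pre_dividir_mensaje (texto : String) (max_chars : Int) : Prop := 1 ≤ max_chars
instance (texto : String) (max_chars : Int) : Decidable (Pre_dividir_mensaje texto max_chars) := by
  unfold Pre_dividir_mensaje; infer_instance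

def pvWitness_dividir_mensaje : String × Int := ("ab\ncd", 3)

def Spec_dividir_mensaje (texto : String) (max_chars : Int) (out : List String) : Prop :=
  out = dividir_mensaje_alt texto max_chars
instance (texto : String) (max_chars : Int) (out : List String) :
    Decidable (Spec_dividir_mensaje texto max_chars out) := by
  unfold Spec_dividir_mensaje; infer_instance

-- ===== CLAIM (what is proved, stated in full; the proofs are below) =====
def Claim_equal_dividir_mensaje : Prop := ∀ (texto : String) (max_chars : Int), Dom_dividir_mensaje texto max_chars → Pre_dividir_mensaje texto max_chars → Spec_dividir_mensaje texto max_chars (dividir_mensaje texto max_chars)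

-- ===== LEMMAS AND PROOFS =====

-- A's remaining text, as the window [i, e) of the original character list
def dmSeg (s : List Char) (i e : Int) : List Char := (s.drop i.toNat).take (e - i).toNat

theorem dmSeg_length (s : List Char) (i e : Int) (h0 : 0 ≤ i)
    (hlen : e ≤ (s.length : Int)) : (dmSeg s i e).length = (e - i).toNat := by
  simp [dmSeg]; omega

theorem dmSeg_cons (s : List Char) (i e : Int) (h0 : 0 ≤ i) (hie : i < e)
    (hidx : i.toNat < s.length) :
    dmSeg s i e = s[i.toNat] :: dmSeg s (i + 1) e := by
  unfold dmSeg
  rw [List.drop_eq_getElem_cons hidx]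
  have h1 : (e - i).toNat = (e - (i + 1)).toNat + 1 := by omega
  have h2 : (i + 1).toNat = i.toNat + 1 := by omega
  rw [h1, h2, List.take_succ_cons]

theorem dmSeg_snoc (s : List Char) (i e : Int) (h0 : 0 ≤ i) (hie : i < e)
    (hidx : (e - 1).toNat < s.length) :
    dmSeg s i e = dmSeg s i (e - 1) ++ [s[(e - 1).toNat]] := by
  unfold dmSeg
  have h1 : (e - i).toNat = (e - 1 - i).toNat + 1 := by omega
  rw [h1, List.take_add_one, List.getElem?_drop]
  have h2 : i.toNat + (e - 1 - i).toNat = (e - 1).toNat := by omega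
  rw [h2, List.getElem?_eq_getElem hidx]
  rfl

theorem dmSkipWs_bounds (s : List Char) (i e : Int) (h : i ≤ e) :
    i ≤ dmSkipWs s i e ∧ dmSkipWs s i e ≤ e := by
  fun_induction dmSkipWs s i e with
  | case1 i h1 ih => omega
  | case2 i h1 => omega

theorem dmTrimEnd_bounds (s : List Char) (i e : Int) (h : i ≤ e) :
    i ≤ dmTrimEnd s i e ∧ dmTrimEnd s i e ≤ e := by
  fun_induction dmTrimEnd s i e with
  | case1 e h1 ih => omega
  | case2 e h1 => omega

-- B's forward whitespace skip computes the lstrip of the window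
theorem dm_lstrip_seg (s : List Char) (i e : Int) (h0 : 0 ≤ i)
    (hlen : e ≤ (s.length : Int)) :
    PySem.Chars.lstrip (dmSeg s i e) = dmSeg s (dmSkipWs s i e) e := by
  rw [dmSkipWs]
  split
  · rename_i h
    obtain ⟨hie, hsp⟩ := h
    have hidx : i.toNat < s.length := by omega
    have hget : PySem.List.pyGetD s i ' ' = s[i.toNat] :=
      PySem.List.pyGetD_eq_getElem s ' ' h0 (by omega)
    rw [hget] at hsp
    rw [dmSeg_cons s i e h0 hie hidx, PySem.Chars.lstrip, List.dropWhile_cons_of_pos hsp]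
    exact dm_lstrip_seg s (i + 1) e (by omega) hlen
  · rename_i h
    by_cases hie : i < e
    · have hidx : i.toNat < s.length := by omega
      have hget : PySem.List.pyGetD s i ' ' = s[i.toNat] :=
        PySem.List.pyGetD_eq_getElem s ' ' h0 (by omega)
      have hsp : ¬ (PySem.Chars.isspace s[i.toNat] = true) := by
        intro hc; exact h ⟨hie, by rw [hget]; exact hc⟩
      rw [dmSeg_cons s i e h0 hie hidx, PySem.Chars.lstrip,
        List.dropWhile_cons_of_neg (by simpa using hsp)]
    · have hnil : dmSeg s i e = [] := by
        unfold dmSeg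
        have hz : (e - i).toNat = 0 := by omega
        rw [hz]; simp
      rw [hnil]; simp [PySem.Chars.lstrip]
  termination_by (e - i).toNat
  decreasing_by omega

-- B's backward whitespace trim computes the rstrip of the window
theorem dm_rstrip_seg (s : List Char) (i e : Int) (h0 : 0 ≤ i)
    (hlen : e ≤ (s.length : Int)) :
    PySem.Chars.rstrip (dmSeg s i e) = dmSeg s i (dmTrimEnd s i e) := by
  rw [dmTrimEnd]
  split
  · rename_i h
    obtain ⟨hie, hsp⟩ := h
    have hidx : (e - 1).toNat < s.length := by omega
    have hget : PySem.List.pyGetD s (e - 1) ' ' = s[(e - 1).toNat] :=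
      PySem.List.pyGetD_eq_getElem s ' ' (by omega) (by omega)
    rw [hget] at hsp
    rw [dmSeg_snoc s i e h0 hie hidx, PySem.Chars.rstrip, List.reverse_append]
    simp only [List.reverse_cons, List.reverse_nil, List.nil_append, List.singleton_append,
      List.dropWhile_cons_of_pos hsp]
    exact dm_rstrip_seg s i (e - 1) h0 (by omega)
  · rename_i h
    by_cases hie : i < e
    · have hidx : (e - 1).toNat < s.length := by omega
      have hget : PySem.List.pyGetD s (e - 1) ' ' = s[(e - 1).toNat] :=
        PySem.List.pyGetD_eq_getElem s ' ' (by omega) (by omega)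
      have hsp : ¬ (PySem.Chars.isspace s[(e - 1).toNat] = true) := by
        intro hc; exact h ⟨hie, by rw [hget]; exact hc⟩
      rw [dmSeg_snoc s i e h0 hie hidx, PySem.Chars.rstrip, List.reverse_append]
      simp only [List.reverse_cons, List.reverse_nil, List.nil_append, List.singleton_append]
      rw [List.dropWhile_cons_of_neg hsp, List.reverse_cons, List.reverse_reverse]
    · have hnil : dmSeg s i e = [] := by
        unfold dmSeg
        have hz : (e - i).toNat = 0 := by omega
        rw [hz]; simp
      rw [hnil]; simp [PySem.Chars.rstrip]
  termination_by (e - i).toNat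
  decreasing_by omega

theorem dm_strip_seg (s : List Char) (i e : Int) (h0 : 0 ≤ i) (hie : i ≤ e)
    (hlen : e ≤ (s.length : Int)) :
    PySem.Chars.strip (dmSeg s i e) =
      dmSeg s (dmSkipWs s i e) (dmTrimEnd s (dmSkipWs s i e) e) := by
  have hb := dmSkipWs_bounds s i e hie
  rw [PySem.Chars.strip, dm_lstrip_seg s i e h0 hlen,
    dm_rstrip_seg s (dmSkipWs s i e) e (by omega) hlen]

-- rfind stays in range
theorem dm_rfind_go_bounds (s sub : List Char) (k : Nat) :
    PySem.Chars.rfind.go s sub k = -1 ∨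
      (0 ≤ PySem.Chars.rfind.go s sub k ∧ PySem.Chars.rfind.go s sub k ≤ (k : Int)) := by
  induction k with
  | zero => by_cases h : sub.isPrefixOf s <;> simp [PySem.Chars.rfind.go, h]
  | succ j ih =>
    by_cases h : sub.isPrefixOf (List.drop (j + 1) s) <;>
      simp only [PySem.Chars.rfind.go, h, if_pos, if_neg, Bool.not_eq_true] at *
    · right; constructor <;> omega
    · rcases ih with h1 | h1
      · left; exact h1
      · right; push_cast; omega

theorem dm_rfind_bounds (s sub : List Char) :
    PySem.Chars.rfind s sub = -1 ∨
      (0 ≤ PySem.Chars.rfind s sub ∧ PySem.Chars.rfind s sub ≤ (s.length : Int)) :=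
  dm_rfind_go_bounds s sub s.length

-- both rfind calls search the same window of the original string
theorem dm_rfindFrom_A (s : List Char) (i e m : Int) (h0 : 0 ≤ i) (hm : 1 ≤ m)
    (hme : e - i > m) (hlen : e ≤ (s.length : Int)) :
    PySem.Chars.rfindFrom (dmSeg s i e) ['\n'] 0 (some m) =
      PySem.Chars.rfind ((s.drop i.toNat).take m.toNat) ['\n'] := by
  have hL : ((dmSeg s i e).length : Int) = e - i := by
    rw [dmSeg_length s i e h0 hlen]; omega
  have hwin : List.take m.toNat (dmSeg s i e) = (s.drop i.toNat).take m.toNat := by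
    unfold dmSeg
    rw [List.take_take]
    congr 1
    omega
  unfold PySem.Chars.rfindFrom
  dsimp only
  rw [hL]
  rw [if_neg (show ¬ (e - i < m) by omega), if_neg (show ¬ (m < 0) by omega),
    if_neg (show ¬ ((0 : Int) < 0) by omega), if_neg (show ¬ (m < 0) by omega)]
  simp only [Int.toNat_zero, List.drop_zero, hwin]
  split <;> simp_all

theorem dm_rfindFrom_B (s : List Char) (i e m : Int) (h0 : 0 ≤ i) (hm : 1 ≤ m)
    (hme : e - i > m) (hlen : e ≤ (s.length : Int)) :
    PySem.Chars.rfindFrom s ['\n'] i (some (i + m)) =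
      (if PySem.Chars.rfind ((s.drop i.toNat).take m.toNat) ['\n'] = -1 then -1
       else i + PySem.Chars.rfind ((s.drop i.toNat).take m.toNat) ['\n']) := by
  have hwin : List.drop i.toNat (List.take (i + m).toNat s) = (s.drop i.toNat).take m.toNat := by
    rw [List.drop_take]
    congr 1
    omega
  unfold PySem.Chars.rfindFrom
  dsimp only
  rw [if_neg (show ¬ ((s.length : Int) < i + m) by omega),
    if_neg (show ¬ (i + m < 0) by omega), if_neg (show ¬ (i < 0) by omega),
    if_neg (show ¬ (i + m < i) by omega)]
  rw [hwin]

-- the chunk both programs cut off is the same list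
theorem dm_piece_eq (s : List Char) (i e c : Int) (h0 : 0 ≤ i) (hc : 0 ≤ c)
    (hce : c ≤ e - i) :
    List.take c.toNat (dmSeg s i e) = PySem.List.slice s (some i) (some (i + c)) := by
  rw [PySem.List.slice_toNat s h0 (by omega)]
  unfold dmSeg
  rw [List.take_take]
  congr 1
  omega

-- the tail both programs keep is the same window
theorem dm_rest_eq (s : List Char) (i e c : Int) (h0 : 0 ≤ i) (hc : 0 ≤ c)
    (hce : c ≤ e - i) :
    List.drop c.toNat (dmSeg s i e) = dmSeg s (i + c) e := by
  unfold dmSeg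
  rw [List.drop_take, List.drop_drop]
  congr 1
  · omega
  · congr 1
    omega

theorem dm_loop_eq (s : List Char) (m : Int) (hm : 1 ≤ m) :
    ∀ (fuel : Nat) (partes : List (List Char)) (i e : Int), 0 ≤ i → i ≤ e →
      e ≤ (s.length : Int) →
      dmLoopA m fuel partes (dmSeg s i e) = dmLoopB s m fuel partes i e := by
  intro fuel
  induction fuel with
  | zero => intro partes i e _ _ _; rfl
  | succ fuel ih =>
    intro partes i e h0 hie hlen
    have hL : ((dmSeg s i e).length : Int) = e - i := by
      rw [dmSeg_length s i e h0 hlen]; omega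
    rw [dmLoopA, dmLoopB]
    dsimp only
    rw [hL]
    by_cases hcond : e - i > m
    · rw [if_pos hcond, if_pos hcond,
        dm_rfindFrom_A s i e m h0 hm hcond hlen, dm_rfindFrom_B s i e m h0 hm hcond hlen]
      have hwl : (((s.drop i.toNat).take m.toNat).length : Int) = m := by
        simp; omega
      rcases dm_rfind_bounds ((s.drop i.toNat).take m.toNat) ['\n'] with hr | ⟨hr0, hr1⟩
      · rw [hr]
        rw [if_pos (by omega : (-1 : Int) < 0), if_pos rfl, if_neg (by omega : ¬ (-1 : Int) ≥ 0)]
        rw [PySem.List.slice_to _ (by omega), PySem.List.slice_from _ (by omega),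
          dm_piece_eq s i e m h0 (by omega) (by omega),
          dm_rest_eq s i e m h0 (by omega) (by omega),
          dm_strip_seg s (i + m) e (by omega) (by omega) hlen]
        have hsb := dmSkipWs_bounds s (i + m) e (by omega)
        have htb := dmTrimEnd_bounds s (dmSkipWs s (i + m) e) e (by omega)
        exact ih _ _ _ (by omega) (by omega) (by omega)
      · set r := PySem.Chars.rfind ((s.drop i.toNat).take m.toNat) ['\n'] with hrdef
        have hrm : r ≤ m := by rw [← hwl]; exact hr1
        rw [if_neg (by omega : ¬ r < 0), if_neg (by omega : ¬ r = -1),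
          if_pos (by omega : i + r ≥ 0)]
        have hri : i + r - i = r := by omega
        rw [hri]
        rw [PySem.List.slice_to _ (by omega), PySem.List.slice_from _ (by omega),
          dm_piece_eq s i e r h0 (by omega) (by omega),
          dm_rest_eq s i e r h0 (by omega) (by omega),
          dm_strip_seg s (i + r) e (by omega) (by omega) hlen]
        have hsb := dmSkipWs_bounds s (i + r) e (by omega)
        have htb := dmTrimEnd_bounds s (dmSkipWs s (i + r) e) e (by omega)
        exact ih _ _ _ (by omega) (by omega) (by omega)
    · rw [if_neg hcond, if_neg hcond]
      by_cases hne : i < e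
      · rw [if_pos (by
            have : (dmSeg s i e).length ≠ 0 := by rw [dmSeg_length s i e h0 hlen]; omega
            simpa [List.length_eq_zero_iff] using this),
          if_pos hne]
        congr 1
        rw [PySem.List.slice_toNat s h0 (by omega)]
        unfold dmSeg
        have hnn : (e - i).toNat = e.toNat - i.toNat := by omega
        rw [hnn]
      · rw [if_neg (by
            have : (dmSeg s i e).length = 0 := by rw [dmSeg_length s i e h0 hlen]; omega
            simpa [List.length_eq_zero_iff] using this),
          if_neg hne]

theorem dividir_mensaje_eq (texto : String) (max_chars : Int) (h : 1 ≤ max_chars) :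
    dividir_mensaje texto max_chars = dividir_mensaje_alt texto max_chars := by
  unfold dividir_mensaje dividir_mensaje_alt
  by_cases hc : PySem.Str.len texto ≤ max_chars
  · rw [if_pos hc, if_pos hc]
  · rw [if_neg hc, if_neg hc]
    have hseg : dmSeg texto.toList 0 (texto.toList.length : Int) = texto.toList := by
      simp [dmSeg]
    have hloop := dm_loop_eq texto.toList max_chars h (texto.toList.length + 1) [] 0
      (texto.toList.length : Int) le_rfl (by omega) le_rfl
    rw [hseg] at hloop
    rw [hloop]

-- ===== VERDICT (by name: the statement is the Claim_ definition above) =====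
theorem dividir_mensaje_spec : Claim_equal_dividir_mensaje := by
  intro texto max_chars _ hpre
  exact dividir_mensaje_eq texto max_chars hpre
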